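-- pv_equiv track=rewrite | github.com/titom73/avd-cli | tests/integration/test_multiple_parent_groups_and_dual_schema.py | _get_vlan_section
-- ===== SOURCE A (Python) =====
-- def _get_vlan_section(config_content: str, vlan_id: str) -> str:
--     """Extract VLAN section from config for debugging.
--
--     Parameters
--     ----------
--     config_content : str
--         Full configuration content
--     vlan_id : str
--         VLAN ID to extract
--
--     Returns
--     -------
--     str
--         VLAN section (5 lines around the VLAN definition)
--     """
--     lines = config_content.split('\n')
--     for i, line in enumerate(lines):
--         if f'vlan {vlan_id}' in line:
--             start = max(0, i - 1)
--             end = min(len(lines), i + 4)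
--             return '\n'.join(lines[start:end])
--     return f"VLAN {vlan_id} not found in config"
-- ===== SOURCE B (Python) =====
-- def _get_vlan_section(config_content: str, vlan_id: str) -> str:
--     """Extract VLAN section (5-line window) by string offset instead of a line scan."""
--     needle = f'vlan {vlan_id}'
--     pos = config_content.find(needle)
--     if pos == -1:
--         return f"VLAN {vlan_id} not found in config"
--     i = config_content[:pos].count('\n')
--     lines = config_content.split('\n')
--     start = max(0, i - 1)
--     end = min(len(lines), i + 4)
--     return '\n'.join(lines[start:end])
-- ===== Notes on version B (the rewrite author's own statement) =====
-- stated objective: alternative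
-- what changed: B locates the first occurrence by a single string-offset find and recovers the line index by counting newlines before it, instead of splitting first and scanning the enumerated lines for a containing one; Pre_ excludes the degenerate inputs where vlan_id contains a newline and the needle occurs in the config, on which A's line-based search reports not-found while B matches across lines.
-- outside the precondition, e.g. on _get_vlan_section('xvlan 1\n2y', '1\n2'): A returns 'VLAN 1\n2 not found in config', B returns 'xvlan 1\n2y'
import Mathlib
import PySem

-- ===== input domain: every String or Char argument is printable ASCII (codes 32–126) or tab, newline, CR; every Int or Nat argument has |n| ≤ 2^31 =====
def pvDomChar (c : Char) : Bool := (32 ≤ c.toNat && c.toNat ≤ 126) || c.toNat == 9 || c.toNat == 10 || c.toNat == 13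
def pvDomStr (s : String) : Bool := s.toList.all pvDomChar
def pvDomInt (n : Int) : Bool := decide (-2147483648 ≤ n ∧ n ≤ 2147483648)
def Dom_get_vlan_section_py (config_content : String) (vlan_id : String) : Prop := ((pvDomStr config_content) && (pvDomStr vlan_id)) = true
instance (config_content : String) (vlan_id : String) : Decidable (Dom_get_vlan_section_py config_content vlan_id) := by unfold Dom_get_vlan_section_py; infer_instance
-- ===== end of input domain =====

-- B locates the first match by string offset + newline counting instead of scanning enumerated lines (objective: alternative).

-- ===== PORT A =====
-- 'for i, line in enumerate(lines): if needle in line: return i' as an index-threading recursion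
def pvFindLineA (needle : String) : List String → Nat → Option Nat
  | [], _ => none
  | l :: rest, i => if PySem.Str.isIn needle l then some i else pvFindLineA needle rest (i + 1)

def get_vlan_section_py (config_content : String) (vlan_id : String) : String :=
  let lines := (PySem.Str.split? config_content "\n").getD []
  match pvFindLineA ("vlan " ++ vlan_id) lines 0 with
  | some i =>
      PySem.Str.join "\n" (PySem.List.slice lines (some (max 0 ((i : Int) - 1))) (some (min (lines.length : Int) ((i : Int) + 4))))
  | none => "VLAN " ++ vlan_id ++ " not found in config"

-- ===== PORT B =====
def get_vlan_section_py_alt (config_content : String) (vlan_id : String) : String :=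
  let pos := PySem.Str.find config_content ("vlan " ++ vlan_id)
  if pos == -1 then "VLAN " ++ vlan_id ++ " not found in config"
  else
    let i : Nat := PySem.Str.count (PySem.Str.slice config_content none (some pos)) "\n"
    let lines := (PySem.Str.split? config_content "\n").getD []
    PySem.Str.join "\n" (PySem.List.slice lines (some (max 0 ((i : Int) - 1))) (some (min (lines.length : Int) ((i : Int) + 4))))

-- ===== PRECONDITION & SPEC =====
-- Pre_ excludes the degenerate inputs whose vlan_id contains a newline AND whose config contains the
-- (line-spanning) needle: there A's line-by-line search returns the not-found message while B's offset
-- search matches across lines — a corner on which either behaviour is defensible.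
def Pre_get_vlan_section_py (config_content : String) (vlan_id : String) : Prop :=
  '\n' ∈ vlan_id.toList → PySem.Str.isIn ("vlan " ++ vlan_id) config_content = false
instance (config_content : String) (vlan_id : String) : Decidable (Pre_get_vlan_section_py config_content vlan_id) := by unfold Pre_get_vlan_section_py; infer_instance

def pvWitness_get_vlan_section_py : String × String := ("interface X\nvlan 10\n name ten\n!", "10")

def Spec_get_vlan_section_py (config_content : String) (vlan_id : String) (out : String) : Prop := out = get_vlan_section_py_alt config_content vlan_id
instance (config_content : String) (vlan_id : String) (out : String) : Decidable (Spec_get_vlan_section_py config_content vlan_id out) := by unfold Spec_get_vlan_section_py; infer_instance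

-- ===== CLAIM (what is proved, stated in full; the proofs are below) =====
def Claim_equal_get_vlan_section_py : Prop := ∀ (config_content : String) (vlan_id : String), Dom_get_vlan_section_py config_content vlan_id → Pre_get_vlan_section_py config_content vlan_id → Spec_get_vlan_section_py config_content vlan_id (get_vlan_section_py config_content vlan_id)

-- ===== LEMMAS AND PROOFS =====

/-- A structural model of Python's `split('\n')` (single-character separator). -/
def pvSplit (c : Char) : List Char → List (List Char)
  | [] => [[]]
  | x :: xs =>
    if x = c then [] :: pvSplit c xs
    else
      match pvSplit c xs with
      | [] => [[x]]
      | h :: t => (x :: h) :: t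

theorem pvSplit_ne_nil (c : Char) (l : List Char) : pvSplit c l ≠ [] := by
  cases l with
  | nil => simp [pvSplit]
  | cons x xs =>
    simp only [pvSplit]
    split
    · simp
    · split <;> simp

theorem splitOn_go_eq (c : Char) : ∀ (l : List Char) (fuel : Nat) (cur : List Char)
    (acc : List (List Char)), l.length ≤ fuel →
    PySem.Chars.splitOn.go [c] fuel l cur acc =
      acc.reverse ++ (match pvSplit c l with
        | [] => []
        | h :: t => (cur.reverse ++ h) :: t) := by
  intro l
  induction l with
  | nil =>
    intro fuel cur acc _
    cases fuel <;> simp [PySem.Chars.splitOn.go, pvSplit]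
  | cons x xs ih =>
    intro fuel cur acc hf
    cases fuel with
    | zero => simp at hf
    | succ f =>
      have hpre : [c].isPrefixOf (x :: xs) = (c == x) := by
        simp [List.isPrefixOf]
      by_cases hx : x = c
      · subst hx
        rw [PySem.Chars.splitOn.go]
        simp only [hpre, beq_self_eq_true, if_true]
        have hd : List.drop [x].length (x :: xs) = xs := by simp
        rw [hd, ih _ _ _ (by simpa using hf)]
        rcases h : pvSplit x xs with _ | ⟨h1, t1⟩
        · exact absurd h (pvSplit_ne_nil x xs)
        · simp [pvSplit, h]
      · rw [PySem.Chars.splitOn.go]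
        have : (c == x) = false := by simp [Ne.symm hx]
        simp only [hpre, this, if_false]
        rw [ih _ _ _ (by simpa using Nat.le_of_succ_le_succ hf)]
        rcases h : pvSplit c xs with _ | ⟨h1, t1⟩
        · exact absurd h (pvSplit_ne_nil c xs)
        · simp [pvSplit, hx, h]

theorem splitOn_eq_pvSplit (c : Char) (cs : List Char) :
    PySem.Chars.splitOn cs [c] = pvSplit c cs := by
  unfold PySem.Chars.splitOn
  rw [splitOn_go_eq c cs (cs.length + 1) [] [] (by omega)]
  rcases h : pvSplit c cs with _ | ⟨h1, t1⟩
  · exact absurd h (pvSplit_ne_nil c cs)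
  · simp

theorem count_go_single (c : Char) : ∀ (l : List Char) (fuel acc : Nat), l.length ≤ fuel →
    PySem.Chars.count.go [c] fuel l acc = acc + l.count c := by
  intro l
  induction l with
  | nil => intro fuel acc _; cases fuel <;> simp [PySem.Chars.count.go]
  | cons x xs ih =>
    intro fuel acc hf
    cases fuel with
    | zero => simp at hf
    | succ f =>
      have hpre : [c].isPrefixOf (x :: xs) = (c == x) := by simp [List.isPrefixOf]
      rw [PySem.Chars.count.go]
      by_cases hx : x = c
      · subst hx
        simp only [hpre, beq_self_eq_true, if_true]
        have hd : List.drop [x].length (x :: xs) = xs := by simp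
        rw [hd, ih _ _ (by simpa using Nat.le_of_succ_le_succ hf)]
        simp [List.count_cons]
        omega
      · have : (c == x) = false := by simp [Ne.symm hx]
        simp only [hpre, this, if_false]
        rw [ih _ _ (by simpa using Nat.le_of_succ_le_succ hf)]
        simp [List.count_cons, hx]

theorem count_single (c : Char) (l : List Char) :
    PySem.Chars.count l [c] = l.count c := by
  unfold PySem.Chars.count
  simp [count_go_single c l l.length 0 le_rfl]

theorem find_eq_of {cs nd : List Char} {k : Nat} (h1 : nd <+: cs.drop k)
    (h2 : ∀ i, i < k → ¬ nd <+: cs.drop i) : PySem.Chars.find cs nd = (k : Int) := by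
  have hinf : nd <:+: cs := h1.isInfix.trans (List.drop_suffix k cs).isInfix
  have h0 : 0 ≤ PySem.Chars.find cs nd := (PySem.Chars.find_nonneg_iff cs nd).2 hinf
  obtain ⟨hp, hmin⟩ := PySem.Chars.find_spec h0
  have hk : (PySem.Chars.find cs nd).toNat = k := by
    rcases lt_trichotomy (PySem.Chars.find cs nd).toNat k with h | h | h
    · exact absurd hp (h2 _ h)
    · exact h
    · exact absurd h1 (hmin k h)
  omega

theorem occ_left {l rest nd : List Char} (hc : '\n' ∉ nd) {j : Nat} (hj : j ≤ l.length) :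
    nd <+: (l ++ '\n' :: rest).drop j ↔ nd <+: l.drop j := by
  rw [List.drop_append_of_le_length hj]
  constructor
  · intro h
    by_cases hlen : nd.length ≤ (l.drop j).length
    · exact List.prefix_of_prefix_length_le h (List.prefix_append _ _) hlen
    · exfalso
      have h2 : (l.drop j) ++ ['\n'] <+: (l.drop j) ++ '\n' :: rest := by
        have : (l.drop j) ++ '\n' :: rest = ((l.drop j) ++ ['\n']) ++ rest := by simp
        rw [this]; exact List.prefix_append _ _
      have h3 : (l.drop j) ++ ['\n'] <+: nd :=
        List.prefix_of_prefix_length_le h2 h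
          (by simp only [List.length_append, List.length_cons, List.length_nil]; omega)
      exact hc (h3.subset (by simp))
  · intro h
    exact h.trans (List.prefix_append _ _)

theorem drop_right {l rest : List Char} {j : Nat} (hj : l.length + 1 ≤ j) :
    (l ++ '\n' :: rest).drop j = rest.drop (j - l.length - 1) := by
  rw [List.drop_append, List.drop_eq_nil_of_le (by omega), List.nil_append]
  conv_lhs => rw [show j - l.length = (j - l.length - 1) + 1 from by omega]
  rw [List.drop_succ_cons]

theorem pvSplit_no_mem {cs : List Char} (h : '\n' ∉ cs) : pvSplit '\n' cs = [cs] := by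
  induction cs with
  | nil => rfl
  | cons x xs ih =>
    simp only [List.mem_cons, not_or] at h
    simp [pvSplit, Ne.symm h.1, ih h.2]

theorem pvSplit_append {l rest : List Char} (h : '\n' ∉ l) :
    pvSplit '\n' (l ++ '\n' :: rest) = l :: pvSplit '\n' rest := by
  induction l with
  | nil => simp [pvSplit]
  | cons x xs ih =>
    simp only [List.mem_cons, not_or] at h
    simp [pvSplit, Ne.symm h.1, ih h.2]

theorem split_decomp {cs : List Char} (h : '\n' ∈ cs) :
    ∃ l rest, cs = l ++ '\n' :: rest ∧ '\n' ∉ l := by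
  induction cs with
  | nil => simp at h
  | cons x xs ih =>
    by_cases hx : x = '\n'
    · exact ⟨[], xs, by simp [hx], by simp⟩
    · have hxs : '\n' ∈ xs := by
        rcases List.mem_cons.1 h with h' | h'
        · exact absurd h'.symm hx
        · exact h'
      obtain ⟨l, rest, heq, hl⟩ := ih hxs
      exact ⟨x :: l, rest, by simp [heq], by simp [hl, Ne.symm hx, hx]⟩

theorem main_find (nd : List Char) (hne : nd ≠ []) (hc : '\n' ∉ nd) :
    ∀ (n : Nat) (cs : List Char), cs.length = n →
    List.findIdx? (fun l => PySem.Chars.isIn nd l) (pvSplit '\n' cs)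
      = if PySem.Chars.find cs nd = -1 then none
        else some ((cs.take (PySem.Chars.find cs nd).toNat).count '\n') := by
  intro n
  induction n using Nat.strong_induction_on with
  | _ n ih =>
    intro cs hlen
    by_cases hmem : '\n' ∈ cs
    · obtain ⟨l, rest, rfl, hl⟩ := split_decomp hmem
      rw [pvSplit_append hl, List.findIdx?_cons]
      by_cases hil : PySem.Chars.isIn nd l
      · simp only [hil, if_true]
        have hfl : 0 ≤ PySem.Chars.find l nd :=
          (PySem.Chars.find_nonneg_iff l nd).2 ((PySem.Chars.isIn_iff_infix nd l).1 hil)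
        obtain ⟨hp, hmin⟩ := PySem.Chars.find_spec hfl
        have hk : (PySem.Chars.find l nd).toNat ≤ l.length := by
          have := PySem.Chars.find_le_length l nd; omega
        have hfind : PySem.Chars.find (l ++ '\n' :: rest) nd = ((PySem.Chars.find l nd).toNat : Int) := by
          refine find_eq_of ((occ_left hc hk).2 hp) ?_
          intro i hi
          rw [occ_left hc (by omega)]
          exact hmin i hi
        rw [hfind]
        have hne1 : ((PySem.Chars.find l nd).toNat : Int) ≠ -1 := by omega
        simp only [hne1, if_false, Int.toNat_natCast]
        rw [List.take_append_of_le_length hk]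
        have : ((l.take (PySem.Chars.find l nd).toNat).count '\n') = 0 := by
          rw [List.count_eq_zero]
          intro hmem'
          exact hl ((List.take_prefix _ _).subset hmem')
        rw [this]
      · simp only [hil, Bool.false_eq_true, if_false]
        have hnol : ∀ j, ¬ nd <+: l.drop j := by
          intro j hj
          have : PySem.Chars.isIn nd l = true :=
            (PySem.Chars.exists_prefix_drop_iff_isIn nd l).1 ⟨j, hj⟩
          simp [this] at hil
        have hrlen : rest.length < n := by simp at hlen; omega
        have IH := ih rest.length hrlen rest rfl
        by_cases hr : PySem.Chars.find rest nd = -1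
        · have hcsn : PySem.Chars.find (l ++ '\n' :: rest) nd = -1 := by
            rw [PySem.Chars.find_eq_neg_one_iff]
            intro hinf
            have : PySem.Chars.isIn nd (l ++ '\n' :: rest) = true :=
              (PySem.Chars.isIn_iff_infix _ _).2 hinf
            obtain ⟨j, hj⟩ := (PySem.Chars.exists_prefix_drop_iff_isIn nd _).2 this
            by_cases hjl : j ≤ l.length
            · exact hnol j ((occ_left hc hjl).1 hj)
            · rw [drop_right (by omega)] at hj
              have : PySem.Chars.isIn nd rest = true :=
                (PySem.Chars.exists_prefix_drop_iff_isIn nd rest).1 ⟨_, hj⟩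
              exact (PySem.Chars.find_eq_neg_one_iff rest nd).1 hr
                ((PySem.Chars.isIn_iff_infix nd rest).1 this)
          rw [hcsn, IH, if_pos hr]
          simp
        · have h0 : 0 ≤ PySem.Chars.find rest nd := by
            have := PySem.Chars.neg_one_le_find rest nd; omega
          obtain ⟨hp', hmin'⟩ := PySem.Chars.find_spec h0
          set k' := (PySem.Chars.find rest nd).toNat with hk'
          have hfind : PySem.Chars.find (l ++ '\n' :: rest) nd = ((l.length + 1 + k' : Nat) : Int) := by
            refine find_eq_of ?_ ?_
            · rw [drop_right (by omega)]
              have : l.length + 1 + k' - l.length - 1 = k' := by omega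
              rw [this]; exact hp'
            · intro i hi
              by_cases hil' : i ≤ l.length
              · rw [occ_left hc hil']; exact hnol _
              · rw [drop_right (by omega)]
                exact hmin' _ (by omega)
          rw [hfind, IH, if_neg hr]
          have hne2 : ((l.length + 1 + k' : Nat) : Int) ≠ -1 := by omega
          simp only [hne2, if_false, Int.toNat_natCast, Option.map_some]
          have htake : (l ++ '\n' :: rest).take (l.length + 1 + k') = l ++ '\n' :: rest.take k' := by
            rw [List.take_append, List.take_of_length_le (by omega)]
            have h2 : l.length + 1 + k' - l.length = k' + 1 := by omega
            rw [h2, List.take_succ_cons]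
          rw [htake]
          have hl0 : l.count '\n' = 0 := List.count_eq_zero.2 hl
          simp [List.count_append, hl0]
    · rw [pvSplit_no_mem hmem, List.findIdx?_cons]
      by_cases hi : PySem.Chars.isIn nd cs
      · simp only [hi, if_true]
        have h0 : 0 ≤ PySem.Chars.find cs nd :=
          (PySem.Chars.find_nonneg_iff cs nd).2 ((PySem.Chars.isIn_iff_infix nd cs).1 hi)
        have hne1 : PySem.Chars.find cs nd ≠ -1 := by omega
        rw [if_neg hne1]
        have : ((cs.take (PySem.Chars.find cs nd).toNat).count '\n') = 0 := by
          rw [List.count_eq_zero]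
          intro hmem'
          exact hmem ((List.take_prefix _ _).subset hmem')
        rw [this]
      · have : PySem.Chars.find cs nd = -1 := by
          rw [PySem.Chars.find_eq_neg_one_iff]
          intro hinf
          exact hi ((PySem.Chars.isIn_iff_infix nd cs).2 hinf)
        simp [hi, this]

theorem pvFindLineA_eq (needle : String) (ls : List String) (i : Nat) :
    pvFindLineA needle ls i
      = (List.findIdx? (fun l => PySem.Str.isIn needle l) ls).map (· + i) := by
  induction ls generalizing i with
  | nil => simp [pvFindLineA]
  | cons x xs ih =>
    rw [List.findIdx?_cons]
    show (if PySem.Str.isIn needle x then some i else pvFindLineA needle xs (i + 1)) = _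
    by_cases h : PySem.Str.isIn needle x
    · rw [if_pos h, if_pos h]
      simp
    · rw [if_neg h, if_neg h, ih (i + 1), Option.map_map]
      congr 1
      funext j
      simp
      omega

theorem pvSplit_chunks (c : Char) : ∀ cs : List Char, ∃ h t, pvSplit c cs = h :: t ∧
    h <+: cs ∧ ∀ l ∈ t, l <:+: cs := by
  intro cs
  induction cs with
  | nil => exact ⟨[], [], rfl, List.nil_prefix, by simp⟩
  | cons x xs ih =>
    obtain ⟨h, t, hsp, hh, ht⟩ := ih
    by_cases hx : x = c
    · refine ⟨[], pvSplit c xs, by simp [pvSplit, hx], List.nil_prefix, ?_⟩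
      intro l hl
      rw [hsp] at hl
      rcases List.mem_cons.1 hl with rfl | hl
      · exact List.infix_cons hh.isInfix
      · exact List.infix_cons (ht l hl)
    · refine ⟨x :: h, t, by simp [pvSplit, hx, hsp], ?_, ?_⟩
      · obtain ⟨t2, ht2⟩ := hh
        exact ⟨t2, by simp [ht2]⟩
      · intro l hl
        exact List.infix_cons (ht l hl)

theorem pvSplit_mem_infix {c : Char} {cs l : List Char} (h : l ∈ pvSplit c cs) : l <:+: cs := by
  obtain ⟨h1, t, hsp, hh, ht⟩ := pvSplit_chunks c cs
  rw [hsp] at h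
  rcases List.mem_cons.1 h with rfl | h
  · exact hh.isInfix
  · exact ht l h

-- ===== VERDICT (by name: the statement is the Claim_ definition above) =====
theorem get_vlan_section_py_spec : Claim_equal_get_vlan_section_py := by
  intro cc vid _hdom hpre
  unfold Spec_get_vlan_section_py
  set nd := ("vlan " ++ vid).toList with hnd
  have hndl : nd = "vlan ".toList ++ vid.toList := by rw [hnd, String.toList_append]
  have hne : nd ≠ [] := by rw [hndl]; simp
  -- the split gives the same lines on both sides
  obtain ⟨L, hL, hLmap⟩ : ∃ L, PySem.Str.split? cc "\n" = some L ∧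
      L.map String.toList = pvSplit '\n' cc.toList := by
    have h1 := PySem.Str.split?_map cc "\n"
    have h2 : PySem.Chars.split? cc.toList "\n".toList
        = some (pvSplit '\n' cc.toList) := by
      show PySem.Chars.split? cc.toList ['\n'] = _
      unfold PySem.Chars.split?
      simp [splitOn_eq_pvSplit]
    rw [h2] at h1
    cases hsp : PySem.Str.split? cc "\n" with
    | none => rw [hsp] at h1; simp at h1
    | some L =>
      rw [hsp] at h1
      simp only [Option.map_some, Option.some.injEq] at h1
      exact ⟨L, rfl, h1⟩
  by_cases hvn : '\n' ∈ vid.toList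
  case pos =>
    -- vlan_id spans lines but the needle is absent from the config: both return the message
    have hii : PySem.Str.isIn ("vlan " ++ vid) cc = false := hpre hvn
    have hfind : PySem.Str.find cc ("vlan " ++ vid) = -1 := by
      have := PySem.Str.isIn_eq ("vlan " ++ vid) cc
      rw [hii] at this
      have h2 : PySem.Chars.isIn nd cc.toList = false := this.symm
      rw [PySem.Str.find_eq, ← hnd]
      exact (PySem.Chars.find_eq_neg_one_iff _ _).2
        (fun hinf => by rw [(PySem.Chars.isIn_iff_infix nd cc.toList).2 hinf] at h2; cases h2)
    have hnone : pvFindLineA ("vlan " ++ vid) L 0 = none := by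
      rw [pvFindLineA_eq]
      have : List.findIdx? (fun l => PySem.Str.isIn ("vlan " ++ vid) l) L = none := by
        rw [List.findIdx?_eq_none_iff]
        intro x hx
        rw [PySem.Str.isIn_eq, ← hnd]
        by_contra hcon
        have hxin : x.toList ∈ pvSplit '\n' cc.toList := by
          rw [← hLmap]; exact List.mem_map_of_mem hx
        have hinf : nd <:+: cc.toList :=
          ((PySem.Chars.isIn_iff_infix nd x.toList).1 (by simpa using hcon)).trans
            (pvSplit_mem_infix hxin)
        have : PySem.Chars.isIn nd cc.toList = true :=
          (PySem.Chars.isIn_iff_infix nd cc.toList).2 hinf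
        have h2 := PySem.Str.isIn_eq ("vlan " ++ vid) cc
        rw [hii, ← hnd, this] at h2
        cases h2
      rw [this]
      rfl
    simp only [get_vlan_section_py, get_vlan_section_py_alt, hL, Option.getD_some, hnone, hfind]
    simp
  case neg =>
  have hc : '\n' ∉ nd := by
    rw [hndl]
    intro hmem
    rcases List.mem_append.1 hmem with h | h
    · simp at h
    · exact hvn h
  -- A's line search as findIdx? over the char-level lines
  have hA : pvFindLineA ("vlan " ++ vid) L 0
      = List.findIdx? (fun l => PySem.Chars.isIn nd l) (pvSplit '\n' cc.toList) := by
    rw [pvFindLineA_eq, ← hLmap, List.findIdx?_map]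
    have : (fun l => PySem.Str.isIn ("vlan " ++ vid) l)
        = (fun l => PySem.Chars.isIn nd l) ∘ String.toList := by
      funext l
      simp [PySem.Str.isIn_eq, hnd, Function.comp]
    rw [this]
    rcases List.findIdx? ((fun l => PySem.Chars.isIn nd l) ∘ String.toList) L with _ | j <;> simp
  have hMain := main_find nd hne hc cc.toList.length cc.toList rfl
  have hBfind : PySem.Str.find cc ("vlan " ++ vid) = PySem.Chars.find cc.toList nd := by
    rw [PySem.Str.find_eq, hnd]
  by_cases hfound : PySem.Chars.find cc.toList nd = -1
  · -- not found: both return the message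
    rw [if_pos hfound] at hMain
    simp only [get_vlan_section_py, get_vlan_section_py_alt, hL, Option.getD_some, hA, hMain,
      hBfind, hfound]
    simp
  · -- found: the computed line indices agree
    rw [if_neg hfound] at hMain
    have h0 : 0 ≤ PySem.Chars.find cc.toList nd := by
      have := PySem.Chars.neg_one_le_find cc.toList nd; omega
    have hBi : PySem.Str.count (PySem.Str.slice cc none (some (PySem.Str.find cc ("vlan " ++ vid)))) "\n"
        = (cc.toList.take (PySem.Chars.find cc.toList nd).toNat).count '\n' := by
      rw [PySem.Str.count_eq, PySem.Str.toList_slice, hBfind]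
      show PySem.Chars.count (PySem.Chars.slice cc.toList none (some _)) ['\n'] = _
      rw [PySem.Chars.slice_eq_listSlice, PySem.List.slice_to _ h0, count_single]
    have hfoundb : (PySem.Str.find cc ("vlan " ++ vid) == (-1 : Int)) = false := by
      rw [hBfind]; simp [hfound]
    simp only [get_vlan_section_py, get_vlan_section_py_alt, hL, Option.getD_some, hA, hMain,
      hfoundb, Bool.false_eq_true, if_false, hBi]
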